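-- pv_equiv track=rewrite | github.com/SubeenPark-unofficial/DCCP | HW3/hw3_p5.py | dia_to_rec_CCW
-- ===== SOURCE A (Python) =====
-- def dia_to_rec_CCW(snail):
--
--     n_rec = int((len(snail)+1)/2)
--     result = [[-1 for x in range(n_rec)] for x in range(n_rec)]
--     for i in range(n_rec):
--         for j in range(i+1):
--             result[i-j][j] = snail[i][j]
--     for i in range(n_rec-1):
--         for j in range(n_rec-1-i):
--             result[n_rec-1-j][i+1+j]= snail[n_rec+i][j]
--     return result
-- ===== SOURCE B (Python) =====
-- def dia_to_rec_CCW(snail):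
--     n = (len(snail) + 1) // 2
--     return [[snail[r + c][c] if r + c <= n - 1 else snail[r + c][n - 1 - r]
--              for c in range(n)]
--             for r in range(n)]
-- ===== Notes on version B (the rewrite author's own statement) =====
-- stated objective: simpler
-- what changed: Replaces the two triangular source-driven write passes into a -1-filled scratch matrix by a single destination-driven comprehension that computes the inverse index map (d = r+c; column c below the anti-diagonal, n-1-r above) for each output cell.
import Mathlib
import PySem

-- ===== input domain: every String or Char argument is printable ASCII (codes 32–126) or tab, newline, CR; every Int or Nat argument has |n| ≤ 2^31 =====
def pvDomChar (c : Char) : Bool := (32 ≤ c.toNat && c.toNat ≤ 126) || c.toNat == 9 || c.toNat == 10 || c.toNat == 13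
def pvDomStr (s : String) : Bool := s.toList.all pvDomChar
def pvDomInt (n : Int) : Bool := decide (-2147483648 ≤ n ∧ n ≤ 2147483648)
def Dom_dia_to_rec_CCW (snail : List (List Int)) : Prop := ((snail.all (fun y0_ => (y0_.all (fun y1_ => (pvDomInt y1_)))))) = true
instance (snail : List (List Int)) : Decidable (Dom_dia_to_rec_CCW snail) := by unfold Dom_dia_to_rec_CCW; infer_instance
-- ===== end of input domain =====

-- B replaces A's two source-driven triangular write passes by one destination-driven pass
-- computing the inverse index map per output cell (objective: simpler).

-- ===== PORT A =====
-- result[i][j] = v  (all indices produced by A are in range under Pre_; getD defaults are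
-- unreachable there)
def pvSet2 (m : List (List Int)) (i j : Nat) (v : Int) : List (List Int) :=
  m.set i ((m.getD i []).set j v)

def dia_to_rec_CCW (snail : List (List Int)) : List (List Int) :=
  -- int((len(snail)+1)/2): exact as Nat floor division for lengths in Dom
  let n := (snail.length + 1) / 2
  let r0 := (List.range n).map (fun _ => (List.range n).map (fun _ => (-1 : Int)))
  let r1 := (List.range n).foldl (fun acc i =>
      (List.range (i+1)).foldl (fun acc j =>
        pvSet2 acc (i - j) j ((snail.getD i []).getD j 0)) acc) r0
  (List.range (n-1)).foldl (fun acc i =>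
      (List.range (n-1-i)).foldl (fun acc j =>
        pvSet2 acc (n-1-j) (i+1+j) ((snail.getD (n+i) []).getD j 0)) acc) r1

-- ===== PORT B =====
def dia_to_rec_CCW_alt (snail : List (List Int)) : List (List Int) :=
  let n := (snail.length + 1) / 2
  (List.range n).map (fun r => (List.range n).map (fun c =>
    if r + c ≤ n - 1 then (snail.getD (r+c) []).getD c 0
    else (snail.getD (r+c) []).getD (n-1-r) 0))

-- ===== PRECONDITION & SPEC =====
-- Pre_: exactly the inputs on which Python A returns (no IndexError): every accessed
-- source row is long enough.
def Pre_dia_to_rec_CCW (snail : List (List Int)) : Prop :=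
  ∀ d ∈ List.range (2 * ((snail.length + 1) / 2) - 1),
    (if d < (snail.length + 1) / 2 then d + 1 else 2 * ((snail.length + 1) / 2) - 1 - d)
      ≤ (snail.getD d []).length
instance (snail : List (List Int)) : Decidable (Pre_dia_to_rec_CCW snail) := by
  unfold Pre_dia_to_rec_CCW; infer_instance

def pvWitness_dia_to_rec_CCW : List (List Int) := [[1], [2, 3], [4]]

def Spec_dia_to_rec_CCW (snail : List (List Int)) (out : List (List Int)) : Prop := out = dia_to_rec_CCW_alt snail
instance (snail : List (List Int)) (out : List (List Int)) : Decidable (Spec_dia_to_rec_CCW snail out) := by unfold Spec_dia_to_rec_CCW; infer_instance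

-- ===== CLAIM (what is proved, stated in full; the proofs are below) =====
def Claim_equal_dia_to_rec_CCW : Prop := ∀ (snail : List (List Int)), Dom_dia_to_rec_CCW snail → Pre_dia_to_rec_CCW snail → Spec_dia_to_rec_CCW snail (dia_to_rec_CCW snail)

-- ===== LEMMAS AND PROOFS =====

-- cell read, with out-of-range defaults (never reached on the indices we argue about)
def pvGet2 (m : List (List Int)) (r c : Nat) : Int := (m.getD r []).getD c 0

-- an n×n matrix shape
def pvShape (n : Nat) (m : List (List Int)) : Prop :=
  m.length = n ∧ ∀ i < n, (m.getD i []).length = n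

theorem pvGetD_set_eq {α : Type} (m : List α) (i : Nat) (x d : α) (h : i < m.length) :
    (m.set i x).getD i d = x := by
  simp [List.getD_eq_getElem?_getD, h]

theorem pvGetD_set_ne {α : Type} (m : List α) (i r : Nat) (x d : α) (h : r ≠ i) :
    (m.set i x).getD r d = m.getD r d := by
  simp [List.getD_eq_getElem?_getD, List.getElem?_set_ne (Ne.symm h)]

theorem pvShape_set2 {n : Nat} {m : List (List Int)} (hsh : pvShape n m)
    {i : Nat} (hi : i < n) (j : Nat) (v : Int) : pvShape n (pvSet2 m i j v) := by
  obtain ⟨hlen, hrow⟩ := hsh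
  refine ⟨by simp [pvSet2, hlen], ?_⟩
  intro r hr
  by_cases hri : r = i
  · subst hri
    rw [pvSet2, pvGetD_set_eq _ _ _ _ (by omega), List.length_set]
    exact hrow r hr
  · rw [pvSet2, pvGetD_set_ne _ _ _ _ _ hri]
    exact hrow r hr

theorem pvGet2_set2 {n : Nat} {m : List (List Int)} (hsh : pvShape n m)
    {i j r : Nat} (c : Nat) (v : Int) (hi : i < n) (hj : j < n) (hr : r < n) :
    pvGet2 (pvSet2 m i j v) r c = if r = i ∧ c = j then v else pvGet2 m r c := by
  obtain ⟨hlen, hrow⟩ := hsh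
  by_cases hri : r = i
  · subst hri
    rw [pvGet2, pvSet2, pvGetD_set_eq _ _ _ _ (by omega)]
    by_cases hcj : c = j
    · subst hcj
      rw [pvGetD_set_eq _ _ _ _ (by rw [hrow r hr]; omega)]
      simp
    · rw [pvGetD_set_ne _ _ _ _ _ hcj]
      simp [hcj, pvGet2]
  · rw [pvGet2, pvSet2, pvGetD_set_ne _ _ _ _ _ hri]
    simp [hri, pvGet2]

theorem pvShape_foldl {n : Nat} {β : Type} (L : List β)
    (F : List (List Int) → β → List (List Int))
    (hF : ∀ m b, b ∈ L → pvShape n m → pvShape n (F m b))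
    {m : List (List Int)} (hsh : pvShape n m) : pvShape n (L.foldl F m) := by
  induction L generalizing m with
  | nil => exact hsh
  | cons b L ih =>
    exact ih (fun m' b' hb' h => hF m' b' (List.mem_cons_of_mem _ hb') h)
      (hF m b List.mem_cons_self hsh)

-- pass-1 inner loop: iteration i writes result[i-j][j] = a j for j < k
theorem pass1_inner {n i : Nat} (a : Nat → Int) {m : List (List Int)} (hsh : pvShape n m)
    (hi : i < n) {r c : Nat} (hr : r < n) (hc : c < n) (k : Nat) (hk : k ≤ i + 1) :
    pvGet2 ((List.range k).foldl (fun acc j => pvSet2 acc (i - j) j (a j)) m) r c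
      = if c < k ∧ c ≤ i ∧ i - c = r then a c else pvGet2 m r c := by
  induction k with
  | zero => simp
  | succ k ih =>
    rw [List.range_succ, List.foldl_append, List.foldl_cons, List.foldl_nil]
    have hshk : pvShape n ((List.range k).foldl (fun acc j => pvSet2 acc (i - j) j (a j)) m) :=
      pvShape_foldl _ _ (fun m' j hj h => pvShape_set2 h (by omega) _ _) hsh
    rw [pvGet2_set2 hshk c (a k) (by omega) (by omega) hr]
    rw [ih (by omega)]
    by_cases h1 : r = i - k ∧ c = k
    · have hcnd : c < k + 1 ∧ c ≤ i ∧ i - c = r := by omega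
      rw [if_pos h1, if_pos hcnd, h1.2]
    · by_cases h2 : c < k ∧ c ≤ i ∧ i - c = r
      · rw [if_neg h1, if_pos h2, if_pos (show c < k + 1 ∧ c ≤ i ∧ i - c = r by omega)]
      · rw [if_neg h1, if_neg h2, if_neg (show ¬(c < k + 1 ∧ c ≤ i ∧ i - c = r) by omega)]

-- pass-1 outer loop: fills result[r][c] = snail[r+c][c] for r+c < k
theorem pass1_outer {n : Nat} (snail : List (List Int)) (hn : n = (snail.length + 1) / 2)
    {m : List (List Int)} (hsh : pvShape n m) {r c : Nat} (hr : r < n) (hc : c < n)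
    (k : Nat) (hk : k ≤ n) :
    pvGet2 ((List.range k).foldl (fun acc i =>
        (List.range (i+1)).foldl (fun acc j =>
          pvSet2 acc (i - j) j ((snail.getD i []).getD j 0)) acc) m) r c
      = if r + c < k then (snail.getD (r+c) []).getD c 0 else pvGet2 m r c := by
  induction k with
  | zero => simp
  | succ k ih =>
    rw [List.range_succ, List.foldl_append, List.foldl_cons, List.foldl_nil]
    have hshk : pvShape n ((List.range k).foldl (fun acc i =>
        (List.range (i+1)).foldl (fun acc j =>
          pvSet2 acc (i - j) j ((snail.getD i []).getD j 0)) acc) m) := by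
      refine pvShape_foldl _ _ (fun m' i hi h => ?_) hsh
      have hi' : i < k := List.mem_range.mp hi
      exact pvShape_foldl _ _ (fun m'' j hj h' => pvShape_set2 h' (by omega) _ _) h
    rw [pass1_inner _ hshk (by omega) hr hc (k+1) (le_refl _)]
    rw [ih (by omega)]
    by_cases h1 : c < k + 1 ∧ c ≤ k ∧ k - c = r
    · have heq : k = r + c := by omega
      rw [if_pos h1, if_pos (show r + c < k + 1 by omega), heq]
    · by_cases h2 : r + c < k
      · rw [if_neg h1, if_pos h2, if_pos (show r + c < k + 1 by omega)]
      · rw [if_neg h1, if_neg h2, if_neg (show ¬ r + c < k + 1 by omega)]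

-- pass-2 inner loop: iteration i writes result[n-1-j][i+1+j] = snail[n+i][j] for j < k
theorem pass2_inner {n i : Nat} (a : Nat → Int) {m : List (List Int)} (hsh : pvShape n m)
    (hi : i < n - 1) {r c : Nat} (hr : r < n) (hc : c < n) (k : Nat) (hk : k ≤ n - 1 - i) :
    pvGet2 ((List.range k).foldl (fun acc j => pvSet2 acc (n-1-j) (i+1+j) (a j)) m) r c
      = if r + c = n + i ∧ c < i + 1 + k then a (n - 1 - r) else pvGet2 m r c := by
  induction k with
  | zero =>
    have : ¬(r + c = n + i ∧ c < i + 1 + 0) := by omega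
    simp only [List.range_zero, List.foldl_nil, if_neg this]
  | succ k ih =>
    rw [List.range_succ, List.foldl_append, List.foldl_cons, List.foldl_nil]
    have hshk : pvShape n ((List.range k).foldl
        (fun acc j => pvSet2 acc (n-1-j) (i+1+j) (a j)) m) :=
      pvShape_foldl _ _ (fun m' j hj h => pvShape_set2 h (by omega) _ _) hsh
    rw [pvGet2_set2 hshk c (a k) (by omega) (by omega) hr]
    rw [ih (by omega)]
    by_cases h1 : r = n - 1 - k ∧ c = i + 1 + k
    · have hcnd : r + c = n + i ∧ c < i + 1 + (k + 1) := by omega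
      rw [if_pos h1, if_pos hcnd, show n - 1 - r = k by omega]
    · by_cases h2 : r + c = n + i ∧ c < i + 1 + k
      · rw [if_neg h1, if_pos h2,
          if_pos (show r + c = n + i ∧ c < i + 1 + (k + 1) by omega)]
      · rw [if_neg h1, if_neg h2,
          if_neg (show ¬(r + c = n + i ∧ c < i + 1 + (k + 1)) by omega)]

-- pass-2 outer loop: fills result[r][c] = snail[r+c][n-1-r] for n ≤ r+c < n+k
theorem pass2_outer {n : Nat} (snail : List (List Int)) (hn : n = (snail.length + 1) / 2)
    {m : List (List Int)} (hsh : pvShape n m) {r c : Nat} (hr : r < n) (hc : c < n)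
    (k : Nat) (hk : k ≤ n - 1) :
    pvGet2 ((List.range k).foldl (fun acc i =>
        (List.range (n-1-i)).foldl (fun acc j =>
          pvSet2 acc (n-1-j) (i+1+j) ((snail.getD (n+i) []).getD j 0)) acc) m) r c
      = if n ≤ r + c ∧ r + c < n + k then (snail.getD (r+c) []).getD (n-1-r) 0
        else pvGet2 m r c := by
  induction k with
  | zero =>
    have : ¬(n ≤ r + c ∧ r + c < n + 0) := by omega
    simp only [List.range_zero, List.foldl_nil, if_neg this]
  | succ k ih =>
    rw [List.range_succ, List.foldl_append, List.foldl_cons, List.foldl_nil]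
    have hshk : pvShape n ((List.range k).foldl (fun acc i =>
        (List.range (n-1-i)).foldl (fun acc j =>
          pvSet2 acc (n-1-j) (i+1+j) ((snail.getD (n+i) []).getD j 0)) acc) m) := by
      refine pvShape_foldl _ _ (fun m' i hi h => ?_) hsh
      have hi' : i < k := List.mem_range.mp hi
      refine pvShape_foldl _ _ (fun m'' j hj h' => ?_) h
      have hj' : j < n - 1 - i := List.mem_range.mp hj
      exact pvShape_set2 h' (by omega) _ _
    rw [pass2_inner _ hshk (by omega) hr hc (n-1-k) (by omega)]
    rw [ih (by omega)]
    by_cases h1 : r + c = n + k ∧ c < k + 1 + (n - 1 - k)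
    · rw [if_pos h1, if_pos (show n ≤ r + c ∧ r + c < n + (k + 1) by omega),
        show n + k = r + c by omega]
    · by_cases h2 : n ≤ r + c ∧ r + c < n + k
      · rw [if_neg h1, if_pos h2, if_pos (show n ≤ r + c ∧ r + c < n + (k + 1) by omega)]
      · rw [if_neg h1, if_neg h2,
          if_neg (show ¬(n ≤ r + c ∧ r + c < n + (k + 1)) by omega)]

theorem pvShape_r0 (n : Nat) :
    pvShape n ((List.range n).map (fun _ => (List.range n).map (fun _ => (-1 : Int)))) := by
  constructor
  · simp
  · intro i hi
    rw [List.getD_eq_getElem?_getD]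
    rw [List.getElem?_map]
    simp [List.getElem?_range hi]

theorem pvShape_A (snail : List (List Int)) :
    pvShape ((snail.length + 1) / 2) (dia_to_rec_CCW snail) := by
  unfold dia_to_rec_CCW
  set n := (snail.length + 1) / 2 with hn
  refine pvShape_foldl _ _ (fun m' i hi h => ?_) ?_
  · have hi' : i < n - 1 := List.mem_range.mp hi
    refine pvShape_foldl _ _ (fun m'' j hj h' => ?_) h
    have hj' : j < n - 1 - i := List.mem_range.mp hj
    exact pvShape_set2 h' (by omega) _ _
  · refine pvShape_foldl _ _ (fun m' i hi h => ?_) (pvShape_r0 n)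
    have hi' : i < n := List.mem_range.mp hi
    exact pvShape_foldl _ _ (fun m'' j hj h' => pvShape_set2 h' (by omega) _ _) h

theorem pvGet2_A (snail : List (List Int)) {r c : Nat}
    (hr : r < (snail.length + 1) / 2) (hc : c < (snail.length + 1) / 2) :
    pvGet2 (dia_to_rec_CCW snail) r c
      = (if r + c ≤ (snail.length + 1) / 2 - 1 then (snail.getD (r+c) []).getD c 0
         else (snail.getD (r+c) []).getD ((snail.length + 1) / 2 - 1 - r) 0) := by
  unfold dia_to_rec_CCW
  set n := (snail.length + 1) / 2 with hn
  have hsh0 := pvShape_r0 n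
  have hsh1 : pvShape n ((List.range n).foldl (fun acc i =>
      (List.range (i+1)).foldl (fun acc j =>
        pvSet2 acc (i - j) j ((snail.getD i []).getD j 0)) acc)
      ((List.range n).map (fun _ => (List.range n).map (fun _ => (-1 : Int))))) := by
    refine pvShape_foldl _ _ (fun m' i hi h => ?_) hsh0
    have hi' : i < n := List.mem_range.mp hi
    exact pvShape_foldl _ _ (fun m'' j hj h' => pvShape_set2 h' (by omega) _ _) h
  rw [pass2_outer snail hn hsh1 hr hc (n-1) (le_refl _)]
  rw [pass1_outer snail hn hsh0 hr hc n (le_refl _)]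
  by_cases h : r + c ≤ n - 1
  · rw [if_neg (show ¬(n ≤ r + c ∧ r + c < n + (n - 1)) by omega),
      if_pos (show r + c < n by omega), if_pos h]
  · rw [if_pos (show n ≤ r + c ∧ r + c < n + (n - 1) by omega), if_neg h]

theorem pvGet2_eq_getElem (m : List (List Int)) (r c : Nat)
    (hr : r < m.length) (hc : c < m[r].length) :
    m[r][c] = pvGet2 m r c := by
  rw [pvGet2, List.getD_eq_getElem?_getD, List.getD_eq_getElem?_getD]
  rw [List.getElem?_eq_getElem hr]
  simp [List.getElem?_eq_getElem hc]

-- ===== VERDICT (by name: the statement is the Claim_ definition above) =====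
theorem dia_to_rec_CCW_spec : Claim_equal_dia_to_rec_CCW := by
  intro snail _ _
  unfold Spec_dia_to_rec_CCW dia_to_rec_CCW_alt
  set n := (snail.length + 1) / 2 with hn
  have hshA := pvShape_A snail
  apply List.ext_getElem
  · simp [hshA.1, ← hn]
  · intro r hr1 hr2
    have hrn : r < n := by
      have := hshA.1; rw [← hn] at this; omega
    apply List.ext_getElem
    · have := hshA.2 r hrn
      rw [List.getD_eq_getElem?_getD, List.getElem?_eq_getElem hr1] at this
      simp at this
      simp [this, ← hn]
    · intro c hc1 hc2
      have hcn : c < n := by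
        have := hshA.2 r hrn
        rw [List.getD_eq_getElem?_getD, List.getElem?_eq_getElem hr1] at this
        simp at this
        omega
      rw [pvGet2_eq_getElem _ r c hr1 hc1, pvGet2_A snail hrn hcn]
      simp only [List.getElem_map, List.getElem_range, ← hn]
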